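-- pv_equiv track=rewrite | github.com/maximyuss/LeetCode | code/python/2973.py | placedCoins
-- ===== SOURCE A (Python) =====
-- from typing import List
--
-- def placedCoins(edges: List[List[int]], cost: List[int]) -> List[int]:
--     def dfs(node: int, parent: int) -> list[int]:
--         costs = [cost[node]]
--         for neighbor in graph[node]:
--             if neighbor != parent:
--                 costs.extend(dfs(neighbor, node))
--         costs.sort()
--         if len(costs) < 3:
--             res[node] = 1
--         else:
--             max_product = max(costs[0] * costs[1] * costs[-1], costs[-1] * costs[-2] * costs[-3])
--             res[node] = max(0, max_product)
--         if len(costs) > 5: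
--             return [costs[0], costs[1], costs[-3], costs[-2], costs[-1]]
--         return costs
--
--     n = len(cost)
--     graph = [[] for _ in range(n)]
--     for a, b in edges:
--         graph[a].append(b)
--         graph[b].append(a)
--     res = [0] * n
--     dfs(0, -1)
--     return res
-- ===== SOURCE B (Python) =====
-- def placedCoins(edges, cost):
--     # Iterative explicit-stack post-order machine: frames hold (node, parent,
--     # remaining-neighbour list, accumulated subtree summary); a finished frame's
--     # pruned summary is folded into its parent's accumulator.
--     n = len(cost)
--     graph = [[] for _ in range(n)]
--     for a, b in edges:
--         graph[a].append(b)
--         graph[b].append(a)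
--     res = [0] * n
--     if n == 0:
--         return res
--     stack = [(0, -1, list(graph[0]), [cost[0]])]
--     while stack:
--         node, parent, pending, acc = stack[-1]
--         if pending:
--             nb = pending.pop(0)
--             if nb != parent:
--                 stack.append((nb, node, list(graph[nb]), [cost[nb]]))
--             continue
--         stack.pop()
--         acc.sort()
--         if len(acc) < 3:
--             res[node] = 1
--         else:
--             best = max(acc[0] * acc[1] * acc[-1], acc[-1] * acc[-2] * acc[-3])
--             res[node] = max(0, best)
--         ret = [acc[0], acc[1], acc[-3], acc[-2], acc[-1]] if len(acc) > 5 else acc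
--         if stack:
--             stack[-1][3].extend(ret)
--     return res
-- ===== Notes on version B (the rewrite author's own statement) =====
-- stated objective: alternative
-- what changed: A's recursive DFS with nested per-node lists is replaced by an iterative explicit-stack post-order machine whose frames hold (node, parent, pending neighbours, accumulated summary) and fold each finished frame's pruned summary into its parent's accumulator.
-- outside the precondition, e.g. on placedCoins([[0, -1]], [1, 2]): A returns [1, 0], B returns [1, 0]; on placedCoins([[0, 0]], [5]): A returns [125], B returns [125]; on placedCoins([[1, 2], [2, 3], [3, 1]], [7, 1, 1, 1]): A returns [1, 0, 0, 0], B returns [1, 0, 0, 0]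
import Mathlib
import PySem

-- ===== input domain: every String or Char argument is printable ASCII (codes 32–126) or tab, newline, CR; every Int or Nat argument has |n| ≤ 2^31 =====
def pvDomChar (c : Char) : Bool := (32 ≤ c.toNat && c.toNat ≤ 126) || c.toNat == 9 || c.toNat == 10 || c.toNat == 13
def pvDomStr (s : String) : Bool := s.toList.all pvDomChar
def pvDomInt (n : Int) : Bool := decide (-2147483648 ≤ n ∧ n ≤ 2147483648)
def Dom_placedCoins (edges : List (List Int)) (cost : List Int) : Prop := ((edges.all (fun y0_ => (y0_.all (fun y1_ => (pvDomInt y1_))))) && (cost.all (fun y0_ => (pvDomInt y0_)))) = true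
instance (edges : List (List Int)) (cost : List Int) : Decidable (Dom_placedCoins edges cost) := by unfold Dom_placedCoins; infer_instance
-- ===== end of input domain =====

-- B replaces A's recursive DFS by an iterative explicit-stack post-order machine (same results; objective: alternative decomposition, no recursion).

-- ===== PORT A =====
-- shared low-level helpers (both Python versions contain the identical lines they transliterate)
-- cost[i] / graph[i]: Python raises IndexError out of range (excluded by Pre_), so the total getD form is exact under Pre_
def pvGetI (xs : List Int) (i : Int) : Int := (PySem.List.pyGet? xs i).getD 0
def pvAdj (g : List (List Int)) (i : Int) : List Int := (PySem.List.pyGet? g i).getD []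
-- res[i] = v  (in range under Pre_; Python's negative-index wraparound is excluded by Pre_)
def pvSetAt (res : List Int) (i v : Int) : List Int := PySem.List.pySetD res i v
-- graph = [[] for _ in range(n)]; for a, b in edges: graph[a].append(b); graph[b].append(a)
-- (edges not of shape [a, b] make Python raise ValueError on unpacking: excluded by Pre_, the fold skips them)
def pvBuildGraph (edges : List (List Int)) (n : Nat) : List (List Int) :=
  edges.foldl (fun g e =>
    match e with
    | [a, b] =>
        let g1 := PySem.List.pySetD g a (pvAdj g a ++ [b])
        PySem.List.pySetD g1 b (pvAdj g1 b ++ [a])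
    | _ => g) (List.replicate n [])
-- the tail of dfs: costs.sort(); res[node] = …; prune to 5 elements (identical lines in Source A and Source B)
def pvFinish (node : Int) (costsIn res : List Int) : List Int × List Int :=
  let costs := PySem.List.sorted costsIn (fun x => x) false
  let res' :=
    if costs.length < 3 then pvSetAt res node 1
    else pvSetAt res node (max 0 (max
      ((PySem.List.pyGet? costs 0).getD 0 * (PySem.List.pyGet? costs 1).getD 0 * (PySem.List.pyGet? costs (-1)).getD 0)
      ((PySem.List.pyGet? costs (-1)).getD 0 * (PySem.List.pyGet? costs (-2)).getD 0 * (PySem.List.pyGet? costs (-3)).getD 0)))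
  let ret :=
    if costs.length > 5 then
      [(PySem.List.pyGet? costs 0).getD 0, (PySem.List.pyGet? costs 1).getD 0,
       (PySem.List.pyGet? costs (-3)).getD 0, (PySem.List.pyGet? costs (-2)).getD 0,
       (PySem.List.pyGet? costs (-1)).getD 0]
    else costs
  (ret, res')

-- A's recursive dfs, with a fuel bound on recursion depth (fuel = n suffices on every Pre_ input:
-- in a forest the DFS path visits pairwise-distinct vertices); pvGoA is the 'for neighbor in graph[node]' loop
mutual
def pvDfsA (g : List (List Int)) (cst : List Int) : Nat → Int → Int → List Int → List Int × List Int
  | 0, _node, _parent, res => ([], res)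
  | f+1, node, parent, res =>
      let r := pvGoA g cst f node parent (pvAdj g node) res
      pvFinish node (pvGetI cst node :: r.1) r.2
  termination_by f _node _parent _res => (f, 0, 0)

def pvGoA (g : List (List Int)) (cst : List Int) : Nat → Int → Int → List Int → List Int → List Int × List Int
  | _f, _node, _parent, [], res => ([], res)
  | f, node, parent, nb :: ns, res =>
      if nb = parent then pvGoA g cst f node parent ns res
      else
        let c := pvDfsA g cst f nb node res
        let r := pvGoA g cst f node parent ns c.2
        (c.1 ++ r.1, r.2)
  termination_by f _node _parent ns _res => (f, ns.length, 1)
end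

def placedCoins (edges : List (List Int)) (cost : List Int) : List Int :=
  let n := cost.length
  let g := pvBuildGraph edges n
  let res := List.replicate n (0 : Int)
  (pvDfsA g cost n 0 (-1) res).2

-- ===== PORT B =====
-- iterative post-order machine: a frame is (fuel, node, parent, pending neighbours, accumulated summary);
-- the fuel component is only a termination guard (never exhausted on Pre_ inputs), Source B needs none
def pvFrameW (L : Nat) (fr : Nat × Int × Int × List Int × List Int) : Nat :=
  (L + 3) ^ fr.1 * (fr.2.2.2.1.length + 2)
def pvStackW (L : Nat) (s : List (Nat × Int × Int × List Int × List Int)) : Nat :=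
  (s.map (pvFrameW L)).sum

lemma pvAdj_length_le (g : List (List Int)) (i : Int) :
    (pvAdj g i).length ≤ (g.map List.length).sum := by
  unfold pvAdj
  cases h : PySem.List.pyGet? g i with
  | none => simp
  | some a =>
      have ha : a ∈ g := PySem.List.mem_of_pyGet?_eq_some g h
      simpa using List.single_le_sum (l := g.map List.length) (by simp) _
        (List.mem_map_of_mem ha)

lemma pvW_pop (L : Nat) (f f2 : Nat) (n p n2 p2 : Int) (acc pd2 ac2 ret : List Int)
    (r : List (Nat × Int × Int × List Int × List Int)) :
    pvStackW L ((f2, n2, p2, pd2, ac2 ++ ret) :: r) <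
      pvStackW L ((f, n, p, ([] : List Int), acc) :: (f2, n2, p2, pd2, ac2) :: r) := by
  simp [pvStackW, pvFrameW]

lemma pvW_skip (L : Nat) (f : Nat) (n p nb : Int) (ns acc acc' : List Int)
    (rest : List (Nat × Int × Int × List Int × List Int)) :
    pvStackW L ((f, n, p, ns, acc') :: rest) <
      pvStackW L ((f, n, p, nb :: ns, acc) :: rest) := by
  simp [pvStackW, pvFrameW]

lemma pvW_push (g : List (List Int)) (f' : Nat) (n p nb n2 : Int) (ns acc a1 a2 : List Int)
    (rest : List (Nat × Int × Int × List Int × List Int)) :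
    pvStackW ((g.map List.length).sum) ((f', nb, n2, pvAdj g nb, a1) :: (f' + 1, n, p, ns, a2) :: rest) <
      pvStackW ((g.map List.length).sum) ((f' + 1, n, p, nb :: ns, acc) :: rest) := by
  set L := (g.map List.length).sum with hL
  have h1 : (pvAdj g nb).length + 2 < L + 3 := by
    have := pvAdj_length_le g nb; omega
  have h2 : (L + 3) ^ f' * ((pvAdj g nb).length + 2) < (L + 3) ^ (f' + 1) := by
    rw [pow_succ]
    exact mul_lt_mul_of_pos_left h1 (Nat.pow_pos (a := L + 3) (n := f') (by omega))
  have h3 : (L + 3) ^ (f' + 1) * (ns.length + 2) + (L + 3) ^ (f' + 1) ≤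
      (L + 3) ^ (f' + 1) * (ns.length + 1 + 2) := by ring_nf; omega
  simp [pvStackW, pvFrameW]; omega

def pvLoopB (g : List (List Int)) (cst : List Int)
    (stack : List (Nat × Int × Int × List Int × List Int)) (res : List Int) : List Int :=
  match stack with
  | [] => res
  | (_f, node, _parent, [], acc) :: rest =>
      let fin := pvFinish node acc res
      match rest with
      | [] => fin.2
      | (f2, n2, p2, pd2, ac2) :: r => pvLoopB g cst ((f2, n2, p2, pd2, ac2 ++ fin.1) :: r) fin.2
  | (f, node, parent, nb :: pend, acc) :: rest =>
      if nb = parent then pvLoopB g cst ((f, node, parent, pend, acc) :: rest) res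
      else
        match f with
        | 0 => pvLoopB g cst ((0, node, parent, pend, acc) :: rest) res
        | f' + 1 =>
            pvLoopB g cst ((f', nb, node, pvAdj g nb, [pvGetI cst nb]) :: (f' + 1, node, parent, pend, acc) :: rest) res
  termination_by pvStackW ((g.map List.length).sum) stack
  decreasing_by
  · exact pvW_pop _ _ _ _ _ _ _ _ _ _ _ _
  · exact pvW_skip _ _ _ _ _ _ _ _ _
  · exact pvW_skip _ _ _ _ _ _ _ _ _
  · exact pvW_push _ _ _ _ _ _ _ _ _ _ _

def placedCoins_alt (edges : List (List Int)) (cost : List Int) : List Int :=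
  let n := cost.length
  let g := pvBuildGraph edges n
  let res := List.replicate n (0 : Int)
  if n = 0 then res
  else pvLoopB g cost [(n - 1, 0, -1, pvAdj g 0, [pvGetI cost 0])] res

-- ===== PRECONDITION & SPEC =====
-- Pre_ admits rooted-forest inputs (nonempty cost; every edge a 2-list of in-range nonnegative endpoints;
-- every nonempty vertex subset spans fewer edges than it has vertices, i.e. the graph is simple and acyclic).
-- It excludes exactly: inputs where Python A raises (malformed edges, out-of-range indices, cycles reachable
-- from node 0 → RecursionError), and inputs where A returns only by implementation accident — negative
-- endpoints (Python negative-index wraparound), self-loops/duplicate edges (the DFS walks a subtree twice),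
-- and cycles unreachable from node 0; on those accidental-return inputs B returns the very same value.
def Pre_placedCoins (edges : List (List Int)) (cost : List Int) : Prop :=
  cost ≠ [] ∧
  (∀ e ∈ edges, e.length = 2 ∧ 0 ≤ e.getD 0 0 ∧ e.getD 0 0 < (cost.length : Int) ∧
    0 ≤ e.getD 1 0 ∧ e.getD 1 0 < (cost.length : Int)) ∧
  (∀ S ∈ (Finset.range cost.length).powerset, S.Nonempty →
    (edges.filter (fun e => decide ((e.getD 0 0).toNat ∈ S ∧ (e.getD 1 0).toNat ∈ S))).length < S.card)
instance (edges : List (List Int)) (cost : List Int) : Decidable (Pre_placedCoins edges cost) := by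
  unfold Pre_placedCoins; infer_instance

def pvWitness_placedCoins : List (List Int) × List Int := ([[0, 1], [1, 2]], [2, 3, 4])

def Spec_placedCoins (edges : List (List Int)) (cost : List Int) (out : List Int) : Prop := out = placedCoins_alt edges cost
instance (edges : List (List Int)) (cost : List Int) (out : List Int) : Decidable (Spec_placedCoins edges cost out) := by unfold Spec_placedCoins; infer_instance

-- ===== CLAIM (what is proved, stated in full; the proofs are below) =====
def Claim_equal_placedCoins : Prop := ∀ (edges : List (List Int)) (cost : List Int), Dom_placedCoins edges cost → Pre_placedCoins edges cost → Spec_placedCoins edges cost (placedCoins edges cost)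

-- ===== LEMMAS AND PROOFS =====

-- what the machine does after the top frame is fully evaluated: fold its pruned summary into the next frame
def pvContin (g : List (List Int)) (cst : List Int) (fin : List Int × List Int) :
    List (Nat × Int × Int × List Int × List Int) → List Int
  | [] => fin.2
  | (f2, n2, p2, pd2, ac2) :: r => pvLoopB g cst ((f2, n2, p2, pd2, ac2 ++ fin.1) :: r) fin.2

-- simulation invariant: running the machine from a stack equals finishing the top frame with A's
-- neighbour loop pvGoA and continuing; proved by strong induction on the stack weight
lemma pvSim (m : Nat) : ∀ (g : List (List Int)) (cst : List Int) (f : Nat) (node parent : Int)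
    (pend acc : List Int) (rest : List (Nat × Int × Int × List Int × List Int)) (res : List Int),
    pvStackW ((g.map List.length).sum) ((f, node, parent, pend, acc) :: rest) ≤ m →
    pvLoopB g cst ((f, node, parent, pend, acc) :: rest) res =
      pvContin g cst
        (pvFinish node (acc ++ (pvGoA g cst f node parent pend res).1)
          (pvGoA g cst f node parent pend res).2) rest := by
  induction m using Nat.strong_induction_on with
  | _ m IH =>
    intro g cst f node parent pend acc rest res hW
    set L := (g.map List.length).sum with hL
    rcases pend with _ | ⟨nb, ns⟩
    · rw [pvLoopB.eq_def]
      rcases rest with _ | ⟨⟨f2, n2, p2, pd2, ac2⟩, r⟩ <;> simp [pvGoA, pvContin]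
    · by_cases hnb : nb = parent
      · rw [pvLoopB.eq_def]
        simp only [hnb]
        rw [IH _ (lt_of_lt_of_le (pvW_skip L f node parent nb ns acc acc rest) hW)
            g cst f node parent ns acc rest res (le_refl _)]
        simp [pvGoA]
      · cases f with
        | zero =>
          rw [pvLoopB.eq_def]
          simp only [if_neg hnb]
          rw [IH _ (lt_of_lt_of_le (pvW_skip L 0 node parent nb ns acc acc rest) hW)
              g cst 0 node parent ns acc rest res (le_refl _)]
          simp [pvGoA, pvDfsA, hnb]
        | succ f' =>
          rw [pvLoopB]
          rw [if_neg hnb]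
          rw [IH _ (lt_of_lt_of_le (pvW_push g f' node parent nb node ns acc
                [pvGetI cst nb] acc rest) hW)
              g cst f' nb node (pvAdj g nb) [pvGetI cst nb]
              ((f' + 1, node, parent, ns, acc) :: rest) res (le_refl _)]
          simp only [pvContin]
          rw [IH _ (lt_of_lt_of_le (pvW_skip L (f' + 1) node parent nb ns acc _ rest) hW)
              g cst (f' + 1) node parent ns _ rest _ (le_refl _)]
          simp [pvGoA, pvDfsA, hnb, List.append_assoc]
          rcases rest with _ | ⟨⟨f2, n2, p2, pd2, ac2⟩, r⟩ <;> rfl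

theorem pv_main (edges : List (List Int)) (cost : List Int) :
    placedCoins edges cost = placedCoins_alt edges cost := by
  unfold placedCoins placedCoins_alt
  rcases cost with _ | ⟨c0, cs⟩
  · simp [pvDfsA]
  · simp only [List.length_cons, Nat.add_sub_cancel, if_neg (Nat.succ_ne_zero cs.length)]
    rw [pvSim (pvStackW (((pvBuildGraph edges (cs.length + 1)).map List.length).sum)
          [(cs.length, 0, -1, pvAdj (pvBuildGraph edges (cs.length + 1)) 0, [pvGetI (c0 :: cs) 0])])
        (pvBuildGraph edges (cs.length + 1)) (c0 :: cs) cs.length 0 (-1)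
        (pvAdj (pvBuildGraph edges (cs.length + 1)) 0) [pvGetI (c0 :: cs) 0] []
        (List.replicate (cs.length + 1) 0) (le_refl _)]
    simp [pvContin, pvDfsA]

-- ===== VERDICT (by name: the statement is the Claim_ definition above) =====
theorem placedCoins_spec : Claim_equal_placedCoins := by
  intro edges cost _ _
  exact pv_main edges cost
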